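-- pv_equiv track=rewrite | github.com/raeez/chiral-bar-cobar | compute/lib/bar_presentation_koszul_dual_engine.py | sl2_dual_dim
-- ===== SOURCE A (Python) =====
-- def sl2_dual_dim(n: int) -> int:
--     """dim(sl_2_k^!)_n = dim H^1_n(B(sl_2_k)).
--
--     The bar cohomology is R(n+3) where R = Riordan numbers (OEIS A005043),
--     except at n=2 where the correct value is 5 (not R(5)=6, due to the
--     weight-2 anomaly, rem:bar-deg2-symmetric-square).
--     Values: 3, 5, 15, 36, 91, 232, 603, 1585, ...
--     """
--     if n < 1:
--         return 0
--     # Riordan numbers via recurrence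
--     N = n + 4
--     R = [0] * N
--     R[0] = 1
--     if N > 1:
--         R[1] = 0
--     for k in range(2, N):
--         R[k] = ((k - 1) * (2 * R[k - 1] + 3 * R[k - 2])) // (k + 1)
--     val = R[n + 3]
--     if n == 2:
--         val = 5  # Corrected: H^2 = 5, not R(5) = 6
--     return val
-- ===== SOURCE B (Python) =====
-- def sl2_dual_dim(n: int) -> int:
--     """dim(sl_2_k^!)_n: Riordan number R(n+3), with the weight-2 anomaly at n=2.
--
--     Closed-form: R(m) is the inverse binomial transform of the Catalan numbers,
--     R(m) = sum_{k=0}^{m} (-1)**(m-k) * C(m,k) * Catalan(k).  B evaluates this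
--     hypergeometric sum by divide-and-conquer binary splitting: the term ratio is
--     a_{k+1}/a_k = p(k)/q(k) with p(k) = -(m-k)*(4k+2), q(k) = (k+1)*(k+2), and
--     rec(i, j) returns (P, Q, T) = (prod p, prod q, Q * sum of partial ratios),
--     so the whole sum is (-1)**m * T(0, m+1) // Q(0, m+1).
--     """
--     if n < 1:
--         return 0
--     if n == 2:
--         return 5
--     m = n + 3
--
--     def rec(i: int, j: int):
--         if j - i <= 1:
--             return (-(m - i) * (4 * i + 2), (i + 1) * (i + 2), (i + 1) * (i + 2))
--         mid = (i + j) // 2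
--         p1, q1, t1 = rec(i, mid)
--         p2, q2, t2 = rec(mid, j)
--         return (p1 * p2, q1 * q2, t1 * q2 + p1 * t2)
--
--     _, q, t = rec(0, m + 1)
--     s = t // q
--     return s if m % 2 == 0 else -s
-- ===== Notes on version B (the rewrite author's own statement) =====
-- stated objective: alternative
-- what changed: B replaces A's second-order floor-division recurrence over a table R[0..n+3] with the closed-form inverse binomial transform of the Catalan numbers, R(m) = sum_{k=0}^{m} (-1)^(m-k) C(m,k) Catalan(k), evaluated by divide-and-conquer binary splitting of the hypergeometric term ratio.
import Mathlib
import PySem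

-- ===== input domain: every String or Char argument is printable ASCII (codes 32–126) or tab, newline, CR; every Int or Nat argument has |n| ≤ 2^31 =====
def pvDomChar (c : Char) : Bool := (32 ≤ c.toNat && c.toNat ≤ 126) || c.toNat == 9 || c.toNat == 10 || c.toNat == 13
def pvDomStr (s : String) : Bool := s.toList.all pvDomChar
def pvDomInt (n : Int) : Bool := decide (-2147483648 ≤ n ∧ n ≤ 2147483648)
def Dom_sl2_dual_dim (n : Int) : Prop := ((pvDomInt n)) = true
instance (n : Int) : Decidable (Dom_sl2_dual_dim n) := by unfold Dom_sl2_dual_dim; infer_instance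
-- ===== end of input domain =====

-- B replaces A's second-order floor-division recurrence over a table by the closed-form
-- inverse binomial transform of the Catalan numbers, R(m) = Σ_{k≤m} (-1)^(m-k)·C(m,k)·Cat(k)
-- (objective: alternative algorithm, same asymptotic cost).

-- ===== PORT A =====
-- Literal port of A: build the table R[0..n+3] by the floor-division recurrence,
-- read R[n+3], then the anomaly override.  All list indices A uses are in range, so the
-- total pyGetD/pySetD forms are exact here.
def sl2_dual_dim (n : Int) : Int :=
  if n < 1 then 0
  else
    let N : Int := n + 4
    let R : List Int := List.replicate N.toNat 0   -- [0] * N (N ≥ 5 here, exact)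
    let R := PySem.List.pySetD R 0 1               -- R[0] = 1
    let R := if N > 1 then PySem.List.pySetD R 1 0 else R   -- R[1] = 0
    let R := (PySem.List.pyRange 2 N 1).foldl
      (fun R k => PySem.List.pySetD R k
        (PySem.Int.floordiv
          ((k - 1) * (2 * PySem.List.pyGetD R (k - 1) 0 + 3 * PySem.List.pyGetD R (k - 2) 0))
          (k + 1))) R
    let val := PySem.List.pyGetD R (n + 3) 0
    if n = 2 then 5 else val

-- ===== PORT B =====
-- B-side helper: binary splitting of the hypergeometric sum (Python's rec).
-- The base-case guard is written `j - i ≤ 1` (Python: `j - i <= 1`) which also makes the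
-- definition total; the midpoint `(i + j) // 2` is Nat division, exact for these nonneg indices.
def bsplit (m : Int) (i j : Nat) : Int × Int × Int :=
  if j - i ≤ 1 then
    (-(m - (i : Int)) * (4 * (i : Int) + 2),
     ((i : Int) + 1) * ((i : Int) + 2),
     ((i : Int) + 1) * ((i : Int) + 2))
  else
    let mid := (i + j) / 2
    let a := bsplit m i mid
    let b := bsplit m mid j
    (a.1 * b.1, a.2.1 * b.2.1, a.2.2 * b.2.1 + a.1 * b.2.2)
termination_by j - i
decreasing_by all_goals omega

-- Literal port of B: R(n+3) = (-1)^m * T(0, m+1) // Q(0, m+1) via binary splitting.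
def sl2_dual_dim_alt (n : Int) : Int :=
  if n < 1 then 0
  else if n = 2 then 5
  else
    let m : Int := n + 3
    let r := bsplit m 0 ((m + 1).toNat)   -- rec(0, m + 1): m ≥ 4 here, so the index is exact
    let s := PySem.Int.floordiv r.2.2 r.2.1
    if PySem.Int.mod m 2 = 0 then s else -s

-- ===== PRECONDITION & SPEC =====
def Spec_sl2_dual_dim (n : Int) (out : Int) : Prop := out = sl2_dual_dim_alt n
instance (n : Int) (out : Int) : Decidable (Spec_sl2_dual_dim n out) := by unfold Spec_sl2_dual_dim; infer_instance

-- ===== CLAIM (what is proved, stated in full; the proofs are below) =====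
def Claim_equal_sl2_dual_dim : Prop := ∀ (n : Int), Dom_sl2_dual_dim n → Spec_sl2_dual_dim n (sl2_dual_dim n)

-- ===== LEMMAS AND PROOFS =====

-- The Riordan-number sequence A's loop computes (A005043, via the floor recurrence).
def riordan : Nat → Int
  | 0 => 1
  | 1 => 0
  | (k + 2) => PySem.Int.floordiv ((k + 1) * (2 * riordan (k + 1) + 3 * riordan k)) (k + 3)

-- The closed form B computes: inverse binomial transform of the Catalan numbers.
-- ((-1)^(m+k) = (-1)^(m-k) for k ≤ m, and the binomial vanishes for k > m.)
def rsum (m : Nat) : Int :=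
  ∑ k ∈ Finset.range (m + 1), (-1 : Int) ^ (m + k) * (Nat.choose m k : Int) * (catalan k : Int)

-- ===== A-side: the table A maintains =====
def tableAt (M j : Nat) : List Int :=
  (List.range M).map (fun i => if i ≤ j + 1 then riordan i else 0)

lemma length_tableAt (M j : Nat) : (tableAt M j).length = M := by
  simp [tableAt]

lemma getD_tableAt (M j i : Nat) (hi : i < M) :
    (tableAt M j).getD i 0 = if i ≤ j + 1 then riordan i else 0 := by
  rw [List.getD_eq_getElem?_getD]
  simp [tableAt, hi]

lemma init_eq_tableAt (M : Nat) :
    PySem.List.pySetD (PySem.List.pySetD (List.replicate M (0 : Int)) 0 1) 1 0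
      = tableAt M 0 := by
  have h0 : ((0 : Nat) : Int) = (0 : Int) := rfl
  have h1 : ((1 : Nat) : Int) = (1 : Int) := rfl
  rw [← h0, ← h1, PySem.List.pySetD_natCast, PySem.List.pySetD_natCast]
  apply List.ext_getElem
  · simp [tableAt]
  · intro i hi₁ hi₂
    simp only [tableAt, List.getElem_map, List.getElem_range]
    simp only [List.length_set, List.length_replicate] at hi₁
    rcases Nat.lt_or_ge i 2 with h | h
    · interval_cases i <;> simp [riordan]
    · rw [List.getElem_set_ne (by omega), List.getElem_set_ne (by omega)]
      simp; omega

lemma step_tableAt (M j : Nat) (h : j + 2 < M) :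
    PySem.List.pySetD (tableAt M j) (2 + (j : Int))
      (PySem.Int.floordiv
        ((2 + (j : Int) - 1) * (2 * PySem.List.pyGetD (tableAt M j) (2 + (j : Int) - 1) 0
          + 3 * PySem.List.pyGetD (tableAt M j) (2 + (j : Int) - 2) 0))
        (2 + (j : Int) + 1))
    = tableAt M (j + 1) := by
  have e1 : (2 + (j : Int) - 1) = ((j + 1 : Nat) : Int) := by push_cast; ring
  have e2 : (2 + (j : Int) - 2) = ((j : Nat) : Int) := by ring
  have e0 : (2 + (j : Int)) = ((j + 2 : Nat) : Int) := by push_cast; ring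
  rw [e1, e2, e0, PySem.List.pySetD_natCast,
    PySem.List.pyGetD_natCast, PySem.List.pyGetD_natCast,
    getD_tableAt M j (j + 1) (by omega), getD_tableAt M j j (by omega)]
  simp only [le_refl, if_pos, Nat.le_succ]
  apply List.ext_getElem
  · simp [tableAt]
  · intro i hi₁ hi₂
    simp only [List.length_set, length_tableAt] at hi₁
    by_cases hij : i = j + 2
    · subst hij
      rw [List.getElem_set_self (by simpa [length_tableAt] using h)]
      have : riordan (j + 2)
          = PySem.Int.floordiv (((j : Int) + 1) * (2 * riordan (j + 1) + 3 * riordan j))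
              ((j : Int) + 3) := by simp [riordan]
      simp only [tableAt, List.getElem_map, List.getElem_range]
      rw [if_pos (by omega), this]
      norm_num
      ring_nf
    · rw [List.getElem_set_ne (by omega)]
      simp only [tableAt, List.getElem_map, List.getElem_range]
      by_cases hle : i ≤ j + 1
      · rw [if_pos hle, if_pos (by omega)]
      · rw [if_neg hle, if_neg (by omega)]

lemma a_loop (M j : Nat) (h : j + 2 ≤ M) :
    ((PySem.List.pyRange 2 (2 + (j : Int)) 1).foldl
      (fun R k => PySem.List.pySetD R k
        (PySem.Int.floordiv
          ((k - 1) * (2 * PySem.List.pyGetD R (k - 1) 0 + 3 * PySem.List.pyGetD R (k - 2) 0))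
          (k + 1))) (tableAt M 0))
    = tableAt M j := by
  induction j with
  | zero => simp [PySem.List.pyRange]
  | succ j ih =>
    have h2 : (2 : Int) ≤ 2 + (j : Int) := by omega
    have hr : PySem.List.pyRange 2 (2 + ((j : Int) + 1)) 1
        = PySem.List.pyRange 2 (2 + (j : Int)) 1 ++ [2 + (j : Int)] := by
      have := PySem.List.pyRange_one_succ_right (a := 2) (b := 2 + (j : Int)) h2
      simpa [add_assoc, add_comm, add_left_comm] using this
    push_cast
    rw [hr, List.foldl_append, ih (by omega)]
    exact step_tableAt M j (by omega)

-- ===== B-side mathematics =====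

-- Catalan contiguous relation (k+2)·Cat(k+1) = 2(2k+1)·Cat(k), from Mathlib's centralBinom facts.
lemma cat_step (k : Nat) :
    ((k : Int) + 2) * (catalan (k + 1) : Int) = 2 * (2 * (k : Int) + 1) * (catalan k : Int) := by
  have h : (k + 2) * catalan (k + 1) * (k + 1) = 2 * (2 * k + 1) * catalan k * (k + 1) := by
    have h1 : (k + 1 + 1) * catalan (k + 1) = Nat.centralBinom (k + 1) :=
      succ_mul_catalan_eq_centralBinom (k + 1)
    have h2 : (k + 1) * Nat.centralBinom (k + 1) = 2 * (2 * k + 1) * Nat.centralBinom k :=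
      Nat.succ_mul_centralBinom_succ k
    have h3 : (k + 1) * catalan k = Nat.centralBinom k :=
      succ_mul_catalan_eq_centralBinom k
    calc (k + 2) * catalan (k + 1) * (k + 1)
        = (k + 1) * ((k + 1 + 1) * catalan (k + 1)) := by ring
      _ = (k + 1) * Nat.centralBinom (k + 1) := by rw [h1]
      _ = 2 * (2 * k + 1) * Nat.centralBinom k := h2
      _ = 2 * (2 * k + 1) * ((k + 1) * catalan k) := by rw [h3]
      _ = 2 * (2 * k + 1) * catalan k * (k + 1) := by ring
  have := Nat.eq_of_mul_eq_mul_right (Nat.succ_pos k) h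
  exact_mod_cast this

-- Binomial absorption (k+1)·C(n,k+1) + k·C(n,k) = n·C(n,k)  (valid for ALL n k: the
-- truncation cases vanish with the binomial).
lemma choose_absorb (n k : Nat) :
    ((k : Int) + 1) * (Nat.choose n (k + 1) : Int) + (k : Int) * (Nat.choose n k : Int)
      = (n : Int) * (Nat.choose n k : Int) := by
  by_cases h : k ≤ n
  · have := Nat.choose_succ_right_eq n k
    have hsub : ((n - k : Nat) : Int) = (n : Int) - (k : Int) := by
      exact_mod_cast Int.ofNat_sub h
    have hz : (Nat.choose n (k + 1) : Int) * ((k : Int) + 1)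
        = (Nat.choose n k : Int) * ((n : Int) - (k : Int)) := by
      rw [← hsub]; exact_mod_cast congrArg (Nat.cast : Nat → Int) this
    linarith [hz]
  · rw [Nat.choose_eq_zero_of_lt (by omega), Nat.choose_eq_zero_of_lt (by omega)]
    simp

-- (m+1)·C(m,k+1) + (k+1)·C(m+1,k+1) = (m+1)·C(m+1,k+1).
lemma choose_shift (m k : Nat) :
    ((m : Int) + 1) * (Nat.choose m (k + 1) : Int) + ((k : Int) + 1) * (Nat.choose (m + 1) (k + 1) : Int)
      = ((m : Int) + 1) * (Nat.choose (m + 1) (k + 1) : Int) := by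
  have h1 : ((m : Int) + 1) * (Nat.choose m (k + 1) : Int)
      = (Nat.choose (m + 1) (k + 2) : Int) * ((k : Int) + 2) := by
    exact_mod_cast congrArg (Nat.cast : Nat → Int) (Nat.add_one_mul_choose_eq m (k + 1))
  have h2 := choose_absorb (m + 1) (k + 1)
  push_cast at h2 ⊢
  linarith [h1, h2]

-- The Zeilberger-style binomial identity behind the second-order recurrence.
lemma key_binom (m k : Nat) :
    ((m : Int) + 3) * (Nat.choose (m + 2) (k + 1) : Int)
      + 2 * ((m : Int) + 1) * (Nat.choose (m + 1) (k + 1) : Int)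
    = 2 * (2 * (k : Int) + 3) * (Nat.choose (m + 1) (k + 1) : Int)
      + ((k : Int) + 2) * (Nat.choose (m + 1) k : Int)
      + 3 * ((m : Int) + 1) * (Nat.choose m (k + 1) : Int) := by
  have hP : (Nat.choose (m + 2) (k + 1) : Int)
      = (Nat.choose (m + 1) k : Int) + (Nat.choose (m + 1) (k + 1) : Int) := by
    exact_mod_cast congrArg (Nat.cast : Nat → Int) (Nat.choose_succ_succ (m + 1) k)
  have hA := choose_absorb (m + 1) k
  have hS := choose_shift m k
  push_cast at hP hA hS ⊢
  linear_combination ((m : Int) + 3) * hP - hA - 3 * hS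

-- Certificate for the telescoping proof of the recurrence for rsum.
def gcert (m : Nat) : Nat → Int
  | 0 => 0
  | (k + 1) => (-1 : Int) ^ (m + k) * ((k : Int) + 2) * (Nat.choose (m + 1) k : Int) * (catalan (k + 1) : Int)

-- Pointwise telescoping identity.
lemma point (m k : Nat) :
    ((m : Int) + 3) * ((-1 : Int) ^ (m + 2 + k) * (Nat.choose (m + 2) k : Int) * (catalan k : Int))
      - ((m : Int) + 1) * (2 * ((-1 : Int) ^ (m + 1 + k) * (Nat.choose (m + 1) k : Int) * (catalan k : Int))
          + 3 * ((-1 : Int) ^ (m + k) * (Nat.choose m k : Int) * (catalan k : Int)))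
    = gcert m (k + 1) - gcert m k := by
  cases k with
  | zero => simp [gcert, pow_add, catalan_one]; ring
  | succ k =>
    have hkey := key_binom m k
    have hcat := cat_step (k + 1)
    simp only [gcert]
    have hsgn1 : (-1 : Int) ^ (m + 2 + (k + 1)) = (-1 : Int) ^ (m + (k + 1)) := by
      rw [show m + 2 + (k + 1) = m + (k + 1) + 2 from by omega, pow_add]; ring
    have hsgn2 : (-1 : Int) ^ (m + 1 + (k + 1)) = -(-1 : Int) ^ (m + (k + 1)) := by
      rw [show m + 1 + (k + 1) = m + (k + 1) + 1 from by omega, pow_succ]; ring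
    have hsgn3 : (-1 : Int) ^ (m + k) = -(-1 : Int) ^ (m + (k + 1)) := by
      rw [show m + (k + 1) = m + k + 1 from by omega, pow_succ]; ring
    rw [hsgn1, hsgn2, hsgn3]
    push_cast at hkey hcat ⊢
    linear_combination ((-1 : Int) ^ (m + (k + 1)) * (catalan (k + 1) : Int)) * hkey
      - ((-1 : Int) ^ (m + (k + 1)) * (Nat.choose (m + 1) (k + 1) : Int)) * hcat

-- rsum over the extended range (the extra binomials vanish).
lemma rsum_ext (m e : Nat) :
    (∑ k ∈ Finset.range (m + 1 + e), (-1 : Int) ^ (m + k) * (Nat.choose m k : Int) * (catalan k : Int))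
      = rsum m := by
  induction e with
  | zero => rfl
  | succ e ih =>
    rw [show m + 1 + (e + 1) = (m + 1 + e) + 1 from by omega, Finset.sum_range_succ, ih,
      Nat.choose_eq_zero_of_lt (by omega)]
    simp

-- The second-order recurrence for the closed form.
lemma rsum_rec (m : Nat) :
    ((m : Int) + 3) * rsum (m + 2) = ((m : Int) + 1) * (2 * rsum (m + 1) + 3 * rsum m) := by
  have e2 : rsum (m + 2)
      = ∑ k ∈ Finset.range (m + 3), (-1 : Int) ^ (m + 2 + k) * (Nat.choose (m + 2) k : Int) * (catalan k : Int) := rfl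
  have e1 : (∑ k ∈ Finset.range (m + 3), (-1 : Int) ^ (m + 1 + k) * (Nat.choose (m + 1) k : Int) * (catalan k : Int))
      = rsum (m + 1) := by
    simpa [show m + 1 + 1 + 1 = m + 3 from by omega] using rsum_ext (m + 1) 1
  have e0 : (∑ k ∈ Finset.range (m + 3), (-1 : Int) ^ (m + k) * (Nat.choose m k : Int) * (catalan k : Int))
      = rsum m := by
    simpa [show m + 1 + 2 = m + 3 from by omega] using rsum_ext m 2
  have tele : (∑ k ∈ Finset.range (m + 3), (gcert m (k + 1) - gcert m k))
      = gcert m (m + 3) - gcert m 0 := Finset.sum_range_sub (gcert m) (m + 3)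
  have gz : gcert m (m + 3) = 0 := by
    simp [gcert]
  have expand : ((m : Int) + 3) * rsum (m + 2) - ((m : Int) + 1) * (2 * rsum (m + 1) + 3 * rsum m)
      = ∑ k ∈ Finset.range (m + 3), (gcert m (k + 1) - gcert m k) := by
    rw [e2, ← e1, ← e0]
    simp only [Finset.mul_sum, mul_add, ← Finset.sum_add_distrib, ← Finset.sum_sub_distrib]
    exact Finset.sum_congr rfl (fun k _ => by
      have := point m k
      linarith [this])
  have : ((m : Int) + 3) * rsum (m + 2) - ((m : Int) + 1) * (2 * rsum (m + 1) + 3 * rsum m) = 0 := by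
    rw [expand, tele, gz]; simp [gcert]
  linarith [this]

-- A's floor-division recurrence computes exactly the closed form.
lemma riordan_eq_rsum : ∀ m, riordan m = rsum m := by
  intro m
  induction m using Nat.strong_induction_on with
  | _ m ih =>
    match m with
    | 0 => simp [riordan, rsum]
    | 1 => simp [riordan, rsum, Finset.sum_range_succ, catalan_one]
    | (j + 2) =>
      have h1 := ih (j + 1) (by omega)
      have h0 := ih j (by omega)
      show PySem.Int.floordiv ((j + 1 : Int) * (2 * riordan (j + 1) + 3 * riordan j)) ((j : Int) + 3)
          = rsum (j + 2)
      rw [h1, h0]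
      have harg : ((j : Int) + 1) * (2 * rsum (j + 1) + 3 * rsum j) = ((j : Int) + 3) * rsum (j + 2) :=
        (rsum_rec j).symm
      have hpos : (0 : Int) < (j : Int) + 3 := by positivity
      rw [harg, PySem.Int.floordiv_eq_ediv_of_pos hpos, Int.mul_ediv_cancel_left _ (by omega)]

-- ===== B-side: correctness of the binary splitting =====

def pterm (m : Int) (k : Nat) : Int := -(m - (k : Int)) * (4 * (k : Int) + 2)
def qterm (k : Nat) : Int := ((k : Int) + 1) * ((k : Int) + 2)

def pProd (m : Int) (i j : Nat) : Int := ∏ k ∈ Finset.Ico i j, pterm m k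
def qProd (i j : Nat) : Int := ∏ k ∈ Finset.Ico i j, qterm k
def tSum (m : Int) (i j : Nat) : Int :=
  ∑ k ∈ Finset.Ico i j, (∏ l ∈ Finset.Ico i k, pterm m l) * (∏ l ∈ Finset.Ico k j, qterm l)

lemma qterm_pos (k : Nat) : 0 < qterm k := by
  unfold qterm; positivity

lemma qProd_pos (i j : Nat) : 0 < qProd i j :=
  Finset.prod_pos (fun k _ => qterm_pos k)

lemma tSum_merge (m : Int) (i mid j : Nat) (h1 : i ≤ mid) (h2 : mid ≤ j) :
    tSum m i j = tSum m i mid * qProd mid j + pProd m i mid * tSum m mid j := by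
  unfold tSum pProd qProd
  rw [← Finset.sum_Ico_consecutive _ h1 h2, Finset.sum_mul, Finset.mul_sum]
  congr 1
  · apply Finset.sum_congr rfl
    intro k hk
    rw [Finset.mem_Ico] at hk
    rw [← Finset.prod_Ico_consecutive (f := fun l => qterm l) (hk.2.le) h2]
    ring
  · apply Finset.sum_congr rfl
    intro k hk
    rw [Finset.mem_Ico] at hk
    rw [← Finset.prod_Ico_consecutive (f := fun l => pterm m l) h1 hk.1]
    ring

-- The recursion computes exactly the three range products.
lemma bsplit_eq (m : Int) (i j : Nat) (h : i < j) :
    bsplit m i j = (pProd m i j, qProd i j, tSum m i j) := by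
  induction hn : j - i using Nat.strong_induction_on generalizing i j with
  | _ n ih =>
    rw [bsplit]
    by_cases hb : j - i ≤ 1
    · have hj : j = i + 1 := by omega
      subst hj
      simp [pProd, qProd, tSum, pterm, qterm]
    · simp only [if_neg hb]
      have hmid1 : i < (i + j) / 2 := by omega
      have hmid2 : (i + j) / 2 < j := by omega
      rw [ih ((i + j) / 2 - i) (by omega) i ((i + j) / 2) hmid1 rfl,
          ih (j - (i + j) / 2) (by omega) ((i + j) / 2) j hmid2 rfl]
      have hT := tSum_merge m i ((i + j) / 2) j hmid1.le hmid2.le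
      simp only [pProd, qProd] at hT ⊢
      rw [Finset.prod_Ico_consecutive (f := fun l => pterm m l) hmid1.le hmid2.le,
          Finset.prod_Ico_consecutive (f := fun l => qterm l) hmid1.le hmid2.le, ← hT]

-- The prefix product of p's is the prefix product of q's times the signed term.
lemma pProd_prefix (m k : Nat) (hk : k ≤ m) :
    pProd (m : Int) 0 k
      = qProd 0 k * ((-1 : Int) ^ k * (Nat.choose m k : Int) * (catalan k : Int)) := by
  induction k with
  | zero => simp [pProd, qProd]
  | succ k ih =>
    have hk' : k ≤ m := by omega
    unfold pProd qProd at ih ⊢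
    rw [Finset.prod_Ico_succ_top (Nat.zero_le k), Finset.prod_Ico_succ_top (Nat.zero_le k),
      ih hk']
    -- term step: p(k)·((-1)^k C(m,k) Cat k) = q(k)·((-1)^(k+1) C(m,k+1) Cat(k+1))
    have hle : k < m := by omega
    have hchoose := Nat.choose_succ_right_eq m k
    have hsub : ((m - k : Nat) : Int) = (m : Int) - (k : Int) := by
      exact_mod_cast Int.ofNat_sub hk'
    have h1 : (Nat.choose m (k + 1) : Int) * ((k : Int) + 1)
        = (Nat.choose m k : Int) * (((m - k : Nat)) : Int) := by exact_mod_cast hchoose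
    rw [hsub] at h1
    have h2 := cat_step k
    have hterm : pterm (m : Int) k * ((-1 : Int) ^ k * (Nat.choose m k : Int) * (catalan k : Int))
        = qterm k * ((-1 : Int) ^ (k + 1) * (Nat.choose m (k + 1) : Int) * (catalan (k + 1) : Int)) := by
      simp only [pterm, qterm, pow_succ]
      linear_combination ((-1 : Int) ^ k * (catalan k : Int) * (4 * (k : Int) + 2)) * h1
        + ((-1 : Int) ^ k * ((k : Int) + 1) * (Nat.choose m (k + 1) : Int)) * h2
    calc (∏ l ∈ Finset.Ico 0 k, qterm l) * ((-1 : Int) ^ k * (Nat.choose m k : Int) * (catalan k : Int))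
          * pterm (m : Int) k
        = (∏ l ∈ Finset.Ico 0 k, qterm l)
          * (pterm (m : Int) k * ((-1 : Int) ^ k * (Nat.choose m k : Int) * (catalan k : Int))) := by
          ring
      _ = (∏ l ∈ Finset.Ico 0 k, qterm l)
          * (qterm k * ((-1 : Int) ^ (k + 1) * (Nat.choose m (k + 1) : Int) * (catalan (k + 1) : Int))) := by
          rw [hterm]
      _ = (∏ l ∈ Finset.Ico 0 k, qterm l) * qterm k
          * ((-1 : Int) ^ (k + 1) * (Nat.choose m (k + 1) : Int) * (catalan (k + 1) : Int)) := by
          ring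

-- T(0, m+1) = Q(0, m+1) · Σ_{k≤m} (-1)^k C(m,k) Cat(k).
lemma tSum_val (m : Nat) :
    tSum (m : Int) 0 (m + 1)
      = qProd 0 (m + 1)
        * ∑ k ∈ Finset.range (m + 1), (-1 : Int) ^ k * (Nat.choose m k : Int) * (catalan k : Int) := by
  unfold tSum
  rw [Finset.mul_sum, Finset.range_eq_Ico]
  apply Finset.sum_congr rfl
  intro k hk
  rw [Finset.mem_Ico] at hk
  have hk' : k ≤ m := by omega
  have hp : (∏ l ∈ Finset.Ico 0 k, pterm (m : Int) l)
      = pProd (m : Int) 0 k := rfl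
  rw [hp, pProd_prefix m k hk']
  have hq : qProd 0 k * (∏ l ∈ Finset.Ico k (m + 1), qterm l) = qProd 0 (m + 1) := by
    unfold qProd
    exact Finset.prod_Ico_consecutive (f := fun l => qterm l) (Nat.zero_le k) (by omega)
  calc qProd 0 k * ((-1 : Int) ^ k * (Nat.choose m k : Int) * (catalan k : Int))
        * (∏ l ∈ Finset.Ico k (m + 1), qterm l)
      = (qProd 0 k * (∏ l ∈ Finset.Ico k (m + 1), qterm l))
        * ((-1 : Int) ^ k * (Nat.choose m k : Int) * (catalan k : Int)) := by ring
    _ = qProd 0 (m + 1) * ((-1 : Int) ^ k * (Nat.choose m k : Int) * (catalan k : Int)) := by rw [hq]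

-- B's result, for m ≥ 1, is rsum m.
lemma bsplit_result (m : Nat) :
    (if PySem.Int.mod (m : Int) 2 = 0
     then PySem.Int.floordiv (bsplit (m : Int) 0 (m + 1)).2.2 (bsplit (m : Int) 0 (m + 1)).2.1
     else -(PySem.Int.floordiv (bsplit (m : Int) 0 (m + 1)).2.2 (bsplit (m : Int) 0 (m + 1)).2.1))
    = rsum m := by
  set s : Int := ∑ k ∈ Finset.range (m + 1), (-1 : Int) ^ k * (Nat.choose m k : Int) * (catalan k : Int)
    with hs
  have hb := bsplit_eq (m : Int) 0 (m + 1) (by omega)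
  have hdiv : PySem.Int.floordiv (bsplit (m : Int) 0 (m + 1)).2.2 (bsplit (m : Int) 0 (m + 1)).2.1 = s := by
    rw [hb]
    show PySem.Int.floordiv (tSum (m : Int) 0 (m + 1)) (qProd 0 (m + 1)) = s
    rw [tSum_val, ← hs, PySem.Int.floordiv_eq_ediv_of_pos (qProd_pos 0 (m + 1)),
      Int.mul_ediv_cancel_left _ (ne_of_gt (qProd_pos 0 (m + 1)))]
  have hrs : rsum m = (-1 : Int) ^ m * s := by
    rw [hs, rsum, Finset.mul_sum]
    apply Finset.sum_congr rfl
    intro k _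
    rw [pow_add]; ring
  rw [hdiv, PySem.Int.mod_eq_emod_of_pos (by omega)]
  rcases Nat.even_or_odd m with h | h
  · rw [if_pos (by have := Nat.even_iff.mp h; omega), hrs, Even.neg_one_pow h, one_mul]
  · rw [if_neg (by have := Nat.odd_iff.mp h; omega), hrs, Odd.neg_one_pow h]; ring

-- ===== VERDICT (by name: the statement is the Claim_ definition above) =====
theorem sl2_dual_dim_spec : Claim_equal_sl2_dual_dim := by
  intro n _
  show sl2_dual_dim n = sl2_dual_dim_alt n
  unfold sl2_dual_dim sl2_dual_dim_alt
  by_cases h1 : n < 1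
  · simp [h1]
  · simp only [if_neg h1]
    rw [not_lt] at h1
    by_cases h2 : n = 2
    · subst h2; decide
    · simp only [if_neg h2]
      -- A side: table loop computes riordan (n+3)
      set j : Nat := (n + 2).toNat with hj
      have hjn : (j : Int) = n + 2 := by omega
      have hA : PySem.List.pySetD (PySem.List.pySetD (List.replicate (n + 4).toNat (0 : Int)) 0 1) 1 0
          = tableAt (n + 4).toNat 0 := init_eq_tableAt _
      have hgt : (n + 4 : Int) > 1 := by omega
      simp only [if_pos hgt, hA]
      have hrange : (n + 4 : Int) = 2 + (j : Int) := by omega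
      rw [hrange]
      rw [show ((2 : Int) + (j : Int)).toNat = j + 2 from by omega]
      rw [a_loop (j + 2) j (by omega)]
      have hidx : (n + 3 : Int) = ((j + 1 : Nat) : Int) := by omega
      rw [hidx, PySem.List.pyGetD_natCast, getD_tableAt _ j (j + 1) (by omega), if_pos (le_refl _)]
      -- B side: binary splitting computes rsum (n+3)
      rw [riordan_eq_rsum]
      rw [show (((j + 1 : Nat) : Int) + 1).toNat = (j + 1) + 1 from by omega]
      exact (bsplit_result (j + 1)).symm
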